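-- pv_equiv track=rewrite | github.com/galyarderlabs/galyarder-agent | backend/agent/g_agent/config/schema.py | _explicit_provider_from_model
-- ===== SOURCE A (Python) =====
-- def _explicit_provider_from_model(model: str) -> str | None:
--     """Resolve provider only from explicit model prefix."""
--     lowered = model.lower().strip()
--     explicit_prefixes = (
--         ("openrouter/", "openrouter"),
--         ("deepseek/", "deepseek"),
--         ("anthropic/", "anthropic"),
--         ("claude/", "anthropic"),
--         ("openai/", "openai"),
--         ("gemini/", "gemini"),
--         ("zhipu/", "zhipu"),
--         ("zai/", "zhipu"),
--         ("groq/", "groq"),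
--         ("moonshot/", "moonshot"),
--         ("minimax/", "minimax"),
--         ("dashscope/", "dashscope"),
--         ("qwen/", "dashscope"),
--         ("aihubmix/", "aihubmix"),
--         ("vllm/", "vllm"),
--         ("hosted_vllm/", "vllm"),
--         ("proxy/", "proxy"),
--     )
--     for prefix, provider_name in explicit_prefixes:
--         if lowered.startswith(prefix):
--             return provider_name
--     return None
-- ===== SOURCE B (Python) =====
-- _PROVIDERS = {
--     "openrouter": "openrouter",
--     "deepseek": "deepseek",
--     "anthropic": "anthropic",
--     "claude": "anthropic",
--     "openai": "openai",
--     "gemini": "gemini",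
--     "zhipu": "zhipu",
--     "zai": "zhipu",
--     "groq": "groq",
--     "moonshot": "moonshot",
--     "minimax": "minimax",
--     "dashscope": "dashscope",
--     "qwen": "dashscope",
--     "aihubmix": "aihubmix",
--     "vllm": "vllm",
--     "hosted_vllm": "vllm",
--     "proxy": "proxy",
-- }
--
--
-- def _explicit_provider_from_model(model: str) -> str | None:
--     """Resolve provider only from explicit model prefix."""
--     head, sep, _tail = model.lower().strip().partition("/")
--     if not sep:
--         return None
--     return _PROVIDERS.get(head)
-- ===== Notes on version B (the rewrite author's own statement) =====
-- stated objective: simpler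
-- what changed: Replaces the 17-way startswith scan with a single str.partition at the first slash that extracts the leading token, then one lookup in a module-level token-to-provider dict keyed by the bare token without the trailing slash.
import Mathlib
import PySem

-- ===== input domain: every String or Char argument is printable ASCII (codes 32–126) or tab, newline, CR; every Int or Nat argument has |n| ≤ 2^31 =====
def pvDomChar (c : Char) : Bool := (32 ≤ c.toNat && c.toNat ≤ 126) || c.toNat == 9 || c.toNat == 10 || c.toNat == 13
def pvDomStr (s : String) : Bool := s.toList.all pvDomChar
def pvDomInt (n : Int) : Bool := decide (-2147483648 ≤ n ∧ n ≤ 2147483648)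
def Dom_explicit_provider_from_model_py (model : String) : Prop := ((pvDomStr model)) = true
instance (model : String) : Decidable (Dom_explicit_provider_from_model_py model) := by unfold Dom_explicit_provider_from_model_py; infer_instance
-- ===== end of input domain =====

-- B replaces A's 17-way startswith scan by one str.partition('/') and a dict lookup of the bare leading token (objective: simpler).

-- ===== PORT A =====
def explicit_provider_from_model_py (model : String) : Option String :=
  let lowered := PySem.Str.strip (PySem.Str.lower model)
  let explicit_prefixes : List (String × String) :=
    [("openrouter/", "openrouter"),
     ("deepseek/", "deepseek"),
     ("anthropic/", "anthropic"),
     ("claude/", "anthropic"),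
     ("openai/", "openai"),
     ("gemini/", "gemini"),
     ("zhipu/", "zhipu"),
     ("zai/", "zhipu"),
     ("groq/", "groq"),
     ("moonshot/", "moonshot"),
     ("minimax/", "minimax"),
     ("dashscope/", "dashscope"),
     ("qwen/", "dashscope"),
     ("aihubmix/", "aihubmix"),
     ("vllm/", "vllm"),
     ("hosted_vllm/", "vllm"),
     ("proxy/", "proxy")]
  -- the for-loop with early return is the first match over the prefix list
  (explicit_prefixes.find? (fun pp => PySem.Str.startswith lowered pp.1)).map (fun pp => pp.2)

-- ===== PORT B =====
def pvProviders : PySem.Dict String String := PySem.Dict.ofList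
    [("openrouter", "openrouter"),
     ("deepseek", "deepseek"),
     ("anthropic", "anthropic"),
     ("claude", "anthropic"),
     ("openai", "openai"),
     ("gemini", "gemini"),
     ("zhipu", "zhipu"),
     ("zai", "zhipu"),
     ("groq", "groq"),
     ("moonshot", "moonshot"),
     ("minimax", "minimax"),
     ("dashscope", "dashscope"),
     ("qwen", "dashscope"),
     ("aihubmix", "aihubmix"),
     ("vllm", "vllm"),
     ("hosted_vllm", "vllm"),
     ("proxy", "proxy")]

-- hand port of str.partition (exact: CPython returns (s[:i], sep, s[i+len(sep):]) at the
-- first occurrence i of sep, or (s, '', '') when sep does not occur)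
def pvPartition (s sep : String) : String × String × String :=
  let i := PySem.Str.find s sep
  if i = -1 then (s, "", "")
  else (PySem.Str.slice s none (some i), sep,
        PySem.Str.slice s (some (i + (PySem.Str.len sep : Int))) none)

def explicit_provider_from_model_py_alt (model : String) : Option String :=
  let p := pvPartition (PySem.Str.strip (PySem.Str.lower model)) "/"
  if p.2.1 = "" then none
  else pvProviders.get? p.1

-- ===== PRECONDITION & SPEC =====
def Spec_explicit_provider_from_model_py (model : String) (out : Option String) : Prop := out = explicit_provider_from_model_py_alt model
instance (model : String) (out : Option String) : Decidable (Spec_explicit_provider_from_model_py model out) := by unfold Spec_explicit_provider_from_model_py; infer_instance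

-- ===== CLAIM (what is proved, stated in full; the proofs are below) =====
def Claim_equal_explicit_provider_from_model_py : Prop := ∀ (model : String), Dom_explicit_provider_from_model_py model → Spec_explicit_provider_from_model_py model (explicit_provider_from_model_py model)

-- ===== LEMMAS AND PROOFS =====

-- a singleton list is a prefix exactly of lists starting with that element
lemma pv_singleton_prefix_iff (a : Char) (l : List Char) : [a] <+: l ↔ l.head? = some a := by
  constructor
  · rintro ⟨t, rfl⟩; rfl
  · intro h
    cases l with
    | nil => simp at h
    | cons x xs => simp at h; exact ⟨xs, by simp [h]⟩

-- a prefix determines the early entries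
lemma pv_prefix_getElem? (l₁ l₂ : List Char) (h : l₁ <+: l₂) (i : Nat) (hi : i < l₁.length) :
    l₂[i]? = l₁[i]? := by
  obtain ⟨t, rfl⟩ := h
  exact List.getElem?_append_left hi

-- core: with a '/' present in s, a '/'-terminated prefix (no earlier '/') matches s
-- exactly when its slash-free part IS the token of s before the first '/'
lemma pv_core (s q : List Char) (hq : '/' ∉ q) (hinf : ['/'] <:+: s) :
    (q ++ ['/'] <+: s) ↔ s.take (PySem.Chars.find s ['/']).toNat = q := by
  have hf0 : 0 ≤ PySem.Chars.find s ['/'] := (PySem.Chars.find_nonneg_iff s ['/']).mpr hinf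
  obtain ⟨hpre, hmin⟩ := PySem.Chars.find_spec hf0
  set n := (PySem.Chars.find s ['/']).toNat with hn
  have hsn : s[n]? = some '/' := by
    rw [← List.head?_drop]; exact (pv_singleton_prefix_iff '/' _).mp hpre
  have hmin' : ∀ i, i < n → s[i]? ≠ some '/' := by
    intro i hi hcontra
    exact hmin i hi ((pv_singleton_prefix_iff '/' _).mpr (by rw [List.head?_drop]; exact hcontra))
  constructor
  · intro h
    have hlen : q.length + 1 ≤ s.length := by
      have := h.length_le; simpa using this
    have hslash : s[q.length]? = some '/' := by
      rw [pv_prefix_getElem? _ _ h q.length (by simp)]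
      simp
    have h1 : n ≤ q.length := by
      by_contra hlt
      exact hmin' q.length (by omega) hslash
    have h2 : q.length ≤ n := by
      by_contra hlt
      have hqn : s[n]? = q[n]? := by
        rw [pv_prefix_getElem? _ _ h n (by simp; omega)]
        exact List.getElem?_append_left (by omega)
      rw [hqn] at hsn
      exact hq (List.mem_of_getElem? hsn)
    have heq : n = q.length := le_antisymm h1 h2
    have hteq := List.prefix_iff_eq_take.mp h
    simp only [List.length_append, List.length_cons, List.length_nil, Nat.zero_add] at hteq
    have htake : s.take (q.length + 1) = q ++ ['/'] := hteq.symm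
    have hsucc : s.take (q.length + 1) = s.take q.length ++ s[q.length]?.toList :=
      List.take_add_one
    rw [hsucc] at htake
    rw [hslash] at htake
    simp only [Option.toList_some] at htake
    have := List.append_inj' htake (by rfl)
    rw [heq]
    exact this.1
  · intro h
    have hsucc : s.take (n + 1) = s.take n ++ s[n]?.toList := List.take_add_one
    rw [hsn] at hsucc
    simp only [Option.toList_some] at hsucc
    rw [h] at hsucc
    rw [← hsucc]
    exact List.take_prefix _ _

-- with no '/' in t, no '/'-terminated prefix can match
lemma pv_startswith_none (t p : String) (hl : p.toList.getLast? = some '/')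
    (h : PySem.Str.isIn "/" t = false) :
    PySem.Str.startswith t p = false := by
  rw [PySem.Str.startswith_eq]
  by_contra hc
  have hsw : PySem.Chars.startswith t.toList p.toList = true := by
    cases hx : PySem.Chars.startswith t.toList p.toList
    · exact absurd hx hc
    · rfl
  have hpref : p.toList <+: t.toList := (PySem.Chars.startswith_iff _ _).mp hsw
  have hsuf : ['/'] <:+ p.toList := by
    refine ⟨p.toList.dropLast, ?_⟩
    exact List.dropLast_append_getLast? '/' hl
  have hinf : ['/'] <:+: t.toList := (hsuf.isInfix).trans hpref.isInfix
  have : PySem.Chars.isIn ['/'] t.toList = true := (PySem.Chars.isIn_iff_infix _ _).mpr hinf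
  rw [PySem.Str.isIn_eq] at h
  have h2 : PySem.Chars.isIn ['/'] t.toList = false := by
    have : ("/" : String).toList = ['/'] := by decide
    rw [← this]; exact h
  rw [this] at h2; exact absurd h2 (by simp)

-- with a '/' present, startswith a '/'-terminated prefix p = q ++ "/" tests
-- equality of q with the token of t before the first '/'
lemma pv_startswith_key (t p q : String) (hpq : p.toList = q.toList ++ ['/'])
    (hq : '/' ∉ q.toList)
    (h : PySem.Str.isIn "/" t = true) :
    PySem.Str.startswith t p =
      (q == PySem.Str.slice t none (some (PySem.Str.find t "/"))) := by
  have hslash : ("/" : String).toList = ['/'] := by decide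
  have hinf : ['/'] <:+: t.toList := by
    rw [PySem.Str.isIn_eq, hslash] at h
    exact (PySem.Chars.isIn_iff_infix _ _).mp h
  have hf0 : 0 ≤ PySem.Chars.find t.toList ['/'] := (PySem.Chars.find_nonneg_iff _ _).mpr hinf
  have hkey : (PySem.Str.slice t none (some (PySem.Str.find t "/"))).toList
      = t.toList.take (PySem.Chars.find t.toList ['/']).toNat := by
    rw [PySem.Str.toList_slice, PySem.Str.find_eq, hslash]
    have hcs : PySem.Chars.slice t.toList none (some (PySem.Chars.find t.toList ['/']))
        = PySem.List.slice t.toList none (some (PySem.Chars.find t.toList ['/'])) := rfl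
    rw [hcs, PySem.List.slice_to _ (by omega)]
  apply Bool.coe_iff_coe.mp
  rw [PySem.Str.startswith_eq, PySem.Chars.startswith_iff, beq_iff_eq]
  rw [hpq]
  rw [pv_core t.toList q.toList hq hinf]
  constructor
  · intro he
    apply String.toList_inj.mp
    rw [hkey, he]
  · intro he
    have := congrArg String.toList he
    rw [hkey] at this
    exact this.symm

lemma pv_map : pvProviders = PySem.Dict.mk
    [("openrouter", "openrouter"),
     ("deepseek", "deepseek"),
     ("anthropic", "anthropic"),
     ("claude", "anthropic"),
     ("openai", "openai"),
     ("gemini", "gemini"),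
     ("zhipu", "zhipu"),
     ("zai", "zhipu"),
     ("groq", "groq"),
     ("moonshot", "moonshot"),
     ("minimax", "minimax"),
     ("dashscope", "dashscope"),
     ("qwen", "dashscope"),
     ("aihubmix", "aihubmix"),
     ("vllm", "vllm"),
     ("hosted_vllm", "vllm"),
     ("proxy", "proxy")] := by decide

-- the two bodies agree for every already-normalised string t
lemma pv_main (t : String) :
    (([("openrouter/", "openrouter"),
     ("deepseek/", "deepseek"),
     ("anthropic/", "anthropic"),
     ("claude/", "anthropic"),
     ("openai/", "openai"),
     ("gemini/", "gemini"),
     ("zhipu/", "zhipu"),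
     ("zai/", "zhipu"),
     ("groq/", "groq"),
     ("moonshot/", "moonshot"),
     ("minimax/", "minimax"),
     ("dashscope/", "dashscope"),
     ("qwen/", "dashscope"),
     ("aihubmix/", "aihubmix"),
     ("vllm/", "vllm"),
     ("hosted_vllm/", "vllm"),
     ("proxy/", "proxy")] : List (String × String)).find?
        (fun pp => PySem.Str.startswith t pp.1)).map (fun pp => pp.2)
    = (let p := pvPartition t "/"
       if p.2.1 = "" then none else pvProviders.get? p.1) := by
  cases h : PySem.Str.isIn "/" t with
  | false =>
    have hnf : ¬ ("/" : String).toList <:+: t.toList := by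
      intro hinf
      have := (PySem.Str.isIn_iff_infix "/" t).mpr hinf
      rw [h] at this; exact absurd this (by simp)
    have hf : PySem.Str.find t "/" = -1 := (PySem.Str.find_eq_neg_one_iff t "/").mpr hnf
    simp only [pvPartition, hf]
    simp only [List.find?]
    rw [pv_startswith_none t "openrouter/" (by decide) h]
    rw [pv_startswith_none t "deepseek/" (by decide) h]
    rw [pv_startswith_none t "anthropic/" (by decide) h]
    rw [pv_startswith_none t "claude/" (by decide) h]
    rw [pv_startswith_none t "openai/" (by decide) h]
    rw [pv_startswith_none t "gemini/" (by decide) h]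
    rw [pv_startswith_none t "zhipu/" (by decide) h]
    rw [pv_startswith_none t "zai/" (by decide) h]
    rw [pv_startswith_none t "groq/" (by decide) h]
    rw [pv_startswith_none t "moonshot/" (by decide) h]
    rw [pv_startswith_none t "minimax/" (by decide) h]
    rw [pv_startswith_none t "dashscope/" (by decide) h]
    rw [pv_startswith_none t "qwen/" (by decide) h]
    rw [pv_startswith_none t "aihubmix/" (by decide) h]
    rw [pv_startswith_none t "vllm/" (by decide) h]
    rw [pv_startswith_none t "hosted_vllm/" (by decide) h]
    rw [pv_startswith_none t "proxy/" (by decide) h]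
    simp
  | true =>
    have hinf : ("/" : String).toList <:+: t.toList := (PySem.Str.isIn_iff_infix "/" t).mp h
    have hf : PySem.Str.find t "/" ≠ -1 := (PySem.Str.find_ne_neg_one_iff t "/").mpr hinf
    simp only [pvPartition, if_neg hf]
    simp only [if_neg (by decide : ¬ ("/" : String) = "")]
    rw [pv_map]
    simp only [List.find?]
    rw [pv_startswith_key t "openrouter/" "openrouter" (by decide) (by decide) h]
    rw [pv_startswith_key t "deepseek/" "deepseek" (by decide) (by decide) h]
    rw [pv_startswith_key t "anthropic/" "anthropic" (by decide) (by decide) h]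
    rw [pv_startswith_key t "claude/" "claude" (by decide) (by decide) h]
    rw [pv_startswith_key t "openai/" "openai" (by decide) (by decide) h]
    rw [pv_startswith_key t "gemini/" "gemini" (by decide) (by decide) h]
    rw [pv_startswith_key t "zhipu/" "zhipu" (by decide) (by decide) h]
    rw [pv_startswith_key t "zai/" "zai" (by decide) (by decide) h]
    rw [pv_startswith_key t "groq/" "groq" (by decide) (by decide) h]
    rw [pv_startswith_key t "moonshot/" "moonshot" (by decide) (by decide) h]
    rw [pv_startswith_key t "minimax/" "minimax" (by decide) (by decide) h]
    rw [pv_startswith_key t "dashscope/" "dashscope" (by decide) (by decide) h]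
    rw [pv_startswith_key t "qwen/" "qwen" (by decide) (by decide) h]
    rw [pv_startswith_key t "aihubmix/" "aihubmix" (by decide) (by decide) h]
    rw [pv_startswith_key t "vllm/" "vllm" (by decide) (by decide) h]
    rw [pv_startswith_key t "hosted_vllm/" "hosted_vllm" (by decide) (by decide) h]
    rw [pv_startswith_key t "proxy/" "proxy" (by decide) (by decide) h]
    simp only [PySem.Dict.get?_mk_cons]
    repeat (split <;> rename_i heq <;>
      simp only [heq, Option.map_some, Option.map_none, Bool.false_eq_true, if_false, if_true])
    simp [PySem.Dict.get?]

-- ===== VERDICT (by name: the statement is the Claim_ definition above) =====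
theorem explicit_provider_from_model_py_spec : Claim_equal_explicit_provider_from_model_py := by
  intro model _
  unfold Spec_explicit_provider_from_model_py
  unfold explicit_provider_from_model_py explicit_provider_from_model_py_alt
  exact pv_main (PySem.Str.strip (PySem.Str.lower model))
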